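-- pv_equiv track=rewrite | github.com/NanoTrash/surfaceharvester2.0 | scanner/vulnx_processor.py | _detect_language_from_title
-- ===== SOURCE A (Python) =====
-- def _detect_language_from_title(title: str) -> str:
--     """Определяет язык программирования по названию"""
--     title_lower = title.lower()
--
--     if any(lang in title_lower for lang in ['python', '.py']):
--         return 'python'
--     elif any(lang in title_lower for lang in ['bash', 'shell', '.sh']):
--         return 'bash'
--     elif any(lang in title_lower for lang in ['php', '.php']):
--         return 'php'
--     elif any(lang in title_lower for lang in ['javascript', 'js', '.js']):
--         return 'javascript'
--     elif any(lang in title_lower for lang in ['ruby', '.rb']):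
--         return 'ruby'
--     elif any(lang in title_lower for lang in ['perl', '.pl']):
--         return 'perl'
--     elif any(lang in title_lower for lang in ['java', '.java']):
--         return 'java'
--     elif any(lang in title_lower for lang in [' c ', '.c']):
--         return 'c'
--     else:
--         return 'unknown'
-- ===== SOURCE B (Python) =====
-- _RULES = [
--     ("python", ["python", ".py"]),
--     ("bash", ["bash", "shell", ".sh"]),
--     ("php", ["php", ".php"]),
--     ("javascript", ["javascript", "js", ".js"]),
--     ("ruby", ["ruby", ".rb"]),
--     ("perl", ["perl", ".pl"]),
--     ("java", ["java", ".java"]),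
--     ("c", [" c ", ".c"]),
-- ]
-- _PRIORITY = {lang: i for i, (lang, _) in enumerate(_RULES)}
--
-- def _detect_language_from_title(title: str) -> str:
--     # Collect ALL matching languages, then pick the highest-priority one.
--     # Correct because _PRIORITY ranks languages in A's cascade order and
--     # priorities are distinct, so the minimum is unique.
--     t = title.lower()
--     matched = {lang for lang, pats in _RULES if any(p in t for p in pats)}
--     if not matched:
--         return "unknown"
--     return min(matched, key=lambda lang: _PRIORITY[lang])
-- ===== Notes on version B (the rewrite author's own statement) =====
-- stated objective: alternative
-- what changed: Instead of an ordered first-match cascade, B computes the full SET of matching languages in one comprehension and then selects the winner by taking the minimum under a distinct priority ranking (min over all matches instead of short-circuit first match).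
import Mathlib
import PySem

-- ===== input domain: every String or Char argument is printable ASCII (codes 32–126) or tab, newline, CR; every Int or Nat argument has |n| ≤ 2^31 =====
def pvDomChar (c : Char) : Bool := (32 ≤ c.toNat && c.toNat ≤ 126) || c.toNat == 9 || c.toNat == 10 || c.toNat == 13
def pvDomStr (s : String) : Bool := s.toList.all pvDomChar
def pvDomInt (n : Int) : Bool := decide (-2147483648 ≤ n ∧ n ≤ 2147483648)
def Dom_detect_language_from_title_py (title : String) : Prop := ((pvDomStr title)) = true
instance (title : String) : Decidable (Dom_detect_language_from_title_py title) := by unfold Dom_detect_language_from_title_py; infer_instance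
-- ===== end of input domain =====

-- B computes the full set of matching languages and picks the winner by min over a distinct
-- priority ranking, instead of A's ordered first-match cascade (alternative; same behaviour).


-- ===== PORT A =====
def detect_language_from_title_py (title : String) : String :=
  let title_lower := PySem.Str.lower title
  if ["python", ".py"].any (fun lang => PySem.Str.isIn lang title_lower) then "python"
  else if ["bash", "shell", ".sh"].any (fun lang => PySem.Str.isIn lang title_lower) then "bash"
  else if ["php", ".php"].any (fun lang => PySem.Str.isIn lang title_lower) then "php"
  else if ["javascript", "js", ".js"].any (fun lang => PySem.Str.isIn lang title_lower) then "javascript"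
  else if ["ruby", ".rb"].any (fun lang => PySem.Str.isIn lang title_lower) then "ruby"
  else if ["perl", ".pl"].any (fun lang => PySem.Str.isIn lang title_lower) then "perl"
  else if ["java", ".java"].any (fun lang => PySem.Str.isIn lang title_lower) then "java"
  else if [" c ", ".c"].any (fun lang => PySem.Str.isIn lang title_lower) then "c"
  else "unknown"

-- ===== PORT B =====
def pvRules : List (String × List String) :=
  [("python", ["python", ".py"]),
   ("bash", ["bash", "shell", ".sh"]),
   ("php", ["php", ".php"]),
   ("javascript", ["javascript", "js", ".js"]),
   ("ruby", ["ruby", ".rb"]),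
   ("perl", ["perl", ".pl"]),
   ("java", ["java", ".java"]),
   ("c", [" c ", ".c"])]

-- _PRIORITY = {lang: i for i, (lang, _) in enumerate(_RULES)}
def pvPriority : PySem.Dict String Int :=
  PySem.Dict.ofList ((PySem.List.enumerate (pvRules.map Prod.fst)).map (fun p => (p.2, (p.1 : Int))))

def detect_language_from_title_py_alt (title : String) : String :=
  let t := PySem.Str.lower title
  -- matched = {lang for lang, pats in _RULES if any(p in t for p in pats)}
  let matched : PySem.Set String :=
    PySem.Set.ofList ((pvRules.filter (fun r => r.2.any (fun p => PySem.Str.isIn p t))).map Prod.fst)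
  -- min(matched, key=lambda lang: _PRIORITY[lang]) if matched else "unknown"
  match PySem.List.min? matched (fun lang => PySem.Dict.getD pvPriority lang 0) with
  | none => "unknown"
  | some lang => lang

-- ===== PRECONDITION & SPEC =====
def Spec_detect_language_from_title_py (title : String) (out : String) : Prop := out = detect_language_from_title_py_alt title
instance (title : String) (out : String) : Decidable (Spec_detect_language_from_title_py title out) := by unfold Spec_detect_language_from_title_py; infer_instance

-- ===== CLAIM (what is proved, stated in full; the proofs are below) =====
def Claim_equal_detect_language_from_title_py : Prop := ∀ (title : String), Dom_detect_language_from_title_py title → Spec_detect_language_from_title_py title (detect_language_from_title_py title)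

-- ===== LEMMAS AND PROOFS =====

-- ===== VERDICT (by name: the statement is the Claim_ definition above) =====
theorem detect_language_from_title_py_spec : Claim_equal_detect_language_from_title_py := by
  intro title _
  show detect_language_from_title_py title = detect_language_from_title_py_alt title
  unfold detect_language_from_title_py detect_language_from_title_py_alt
  simp only [pvRules, List.filter_cons, List.filter_nil]
  generalize (["python", ".py"] : List String).any (fun p => PySem.Str.isIn p (PySem.Str.lower title)) = b1
  generalize (["bash", "shell", ".sh"] : List String).any (fun p => PySem.Str.isIn p (PySem.Str.lower title)) = b2
  generalize (["php", ".php"] : List String).any (fun p => PySem.Str.isIn p (PySem.Str.lower title)) = b3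
  generalize (["javascript", "js", ".js"] : List String).any (fun p => PySem.Str.isIn p (PySem.Str.lower title)) = b4
  generalize (["ruby", ".rb"] : List String).any (fun p => PySem.Str.isIn p (PySem.Str.lower title)) = b5
  generalize (["perl", ".pl"] : List String).any (fun p => PySem.Str.isIn p (PySem.Str.lower title)) = b6
  generalize (["java", ".java"] : List String).any (fun p => PySem.Str.isIn p (PySem.Str.lower title)) = b7
  generalize ([" c ", ".c"] : List String).any (fun p => PySem.Str.isIn p (PySem.Str.lower title)) = b8
  revert b1 b2 b3 b4 b5 b6 b7 b8
  decide
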